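-- pv_equiv track=rewrite | github.com/cpm260/ITP270 | ThreadShed/ThreadShed.py | count_color
-- ===== SOURCE A (Python) =====
-- def count_color(color, thread_sold):
--     count = 0
--     thread_sold_split = []
--
--     for thread in thread_sold:
--         if "&" in thread:
--             temp_array = thread.split("&")
--             for t in temp_array:
--                 thread_sold_split.append(t)
--         else:
--             thread_sold_split.append(thread)
--     for thread in thread_sold_split:
--         if str(thread) == str(color):
--             count += 1
--     return int(count)
-- ===== SOURCE B (Python) =====
-- def count_color(color, thread_sold):
--     # Character-level streaming scan: never calls split and builds no token list;
--     # a current-token buffer is compared and reset whenever '&' (or end of thread) is hit.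
--     target = str(color)
--     total = 0
--     for thread in thread_sold:
--         token = ""
--         for ch in thread:
--             if ch == "&":
--                 if token == target:
--                     total += 1
--                 token = ""
--             else:
--                 token += ch
--         if token == target:
--             total += 1
--     return total
-- ===== Notes on version B (the rewrite author's own statement) =====
-- stated objective: alternative
-- what changed: Replaces A's materialize-then-rescan (split each thread on '&' into an intermediate list, then a second counting loop) with a character-level streaming scan that never calls split: a current-token buffer is compared against the color and reset at each '&' or end of thread, so no token list or intermediate split structure ever exists.
import Mathlib
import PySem

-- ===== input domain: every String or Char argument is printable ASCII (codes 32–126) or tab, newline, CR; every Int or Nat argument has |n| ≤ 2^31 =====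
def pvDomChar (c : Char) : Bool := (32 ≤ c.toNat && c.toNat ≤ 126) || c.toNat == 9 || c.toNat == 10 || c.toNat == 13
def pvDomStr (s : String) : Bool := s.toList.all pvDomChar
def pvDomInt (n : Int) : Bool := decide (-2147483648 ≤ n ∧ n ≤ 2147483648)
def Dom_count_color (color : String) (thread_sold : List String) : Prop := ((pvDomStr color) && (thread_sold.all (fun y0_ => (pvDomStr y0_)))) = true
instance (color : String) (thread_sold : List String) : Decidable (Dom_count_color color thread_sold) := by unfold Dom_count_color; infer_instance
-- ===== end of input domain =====

-- B replaces A's split-then-rescan with a character-level streaming scan (no split,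
-- no intermediate token list); objective: alternative (same cost, different algorithm).

-- ===== PORT A =====
-- thread.split("&"): sep "&" is nonempty, so PySem.Str.split? always returns some; .getD [] is never taken.
def count_color (color : String) (thread_sold : List String) : Int :=
  let thread_sold_split : List String :=
    thread_sold.foldl (fun acc thread =>
      if PySem.Str.isIn "&" thread then
        acc ++ ((PySem.Str.split? thread "&").getD [])
      else
        acc ++ [thread]) []
  thread_sold_split.foldl (fun count t => if t == color then count + 1 else count) 0

-- ===== PORT B =====
-- One thread's inner character loop of Source B: state = (current token, running total);
-- Python's `for ch in thread` iterates code points = thread.toList; token += ch is tok ++ [ch].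
def pvScanThread (color : String) (total : Int) (thread : String) : Int :=
  let st := thread.toList.foldl
    (fun (st : List Char × Int) ch =>
      if ch == '&' then
        ([], if String.ofList st.1 == color then st.2 + 1 else st.2)
      else
        (st.1 ++ [ch], st.2)) ([], total)
  if String.ofList st.1 == color then st.2 + 1 else st.2

def count_color_alt (color : String) (thread_sold : List String) : Int :=
  thread_sold.foldl (pvScanThread color) 0

-- ===== PRECONDITION & SPEC =====
def Spec_count_color (color : String) (thread_sold : List String) (out : Int) : Prop := out = count_color_alt color thread_sold
instance (color : String) (thread_sold : List String) (out : Int) : Decidable (Spec_count_color color thread_sold out) := by unfold Spec_count_color; infer_instance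

-- ===== CLAIM (what is proved, stated in full; the proofs are below) =====
def Claim_equal_count_color : Prop := ∀ (color : String) (thread_sold : List String), Dom_count_color color thread_sold → Spec_count_color color thread_sold (count_color color thread_sold)

-- ===== LEMMAS AND PROOFS =====

-- If sep never occurs in l, splitOn.go yields the single remaining piece (any fuel).
theorem splitOn_go_not_infix (sep : List Char) (fuel : Nat) (l cur : List Char)
    (acc : List (List Char)) (h : ¬ sep <:+: l) :
    PySem.Chars.splitOn.go sep fuel l cur acc = ((cur.reverse ++ l) :: acc).reverse := by
  induction fuel generalizing l cur acc with
  | zero => rfl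
  | succ fuel ih =>
    cases l with
    | nil => simp [PySem.Chars.splitOn.go]
    | cons c rest =>
      have hpre : sep.isPrefixOf (c :: rest) = false := by
        cases hx : sep.isPrefixOf (c :: rest) with
        | true => exact absurd (List.isPrefixOf_iff_prefix.mp hx).isInfix h
        | false => rfl
      rw [PySem.Chars.splitOn.go]
      simp only [hpre, Bool.false_eq_true, if_false]
      rw [ih rest (c :: cur) acc (fun hi => h (hi.trans (List.suffix_cons c rest).isInfix))]
      simp

-- If '&' does not occur in t, Python's t.split("&") is [t].
theorem split_no_amp (t : String) (h : PySem.Str.isIn "&" t = false) :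
    (PySem.Str.split? t "&").getD [] = [t] := by
  have hinf : ¬ ("&".toList <:+: t.toList) := by
    intro hi
    have := (PySem.Str.isIn_iff_infix "&" t).mpr hi
    rw [h] at this; exact absurd this (by simp)
  have hc : PySem.Chars.split? t.toList "&".toList = some [t.toList] := by
    rw [PySem.Chars.split?]
    simp only [show ("&".toList.isEmpty) = false by rfl, Bool.false_eq_true, if_false]
    rw [PySem.Chars.splitOn, splitOn_go_not_infix _ _ _ _ _ hinf]
    rfl
  have hmap := PySem.Str.split?_map t "&"
  rw [hc] at hmap
  cases hs : PySem.Str.split? t "&" with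
  | none => rw [hs] at hmap; simp at hmap
  | some ls =>
    rw [hs] at hmap
    simp only [Option.map_some, Option.some.injEq] at hmap
    cases ls with
    | nil => simp at hmap
    | cons x xs =>
      cases xs with
      | nil =>
        simp only [List.map_cons, List.map_nil, List.cons.injEq, and_true] at hmap
        simp [String.toList_injective hmap]
      | cons y ys => simp at hmap

-- Each of A's branches contributes exactly its split tokens, whether or not '&' occurs.
theorem branch_eq_split (t : String) :
    (if PySem.Str.isIn "&" t then (PySem.Str.split? t "&").getD [] else [t]) =
    (PySem.Str.split? t "&").getD [] := by
  cases h : PySem.Str.isIn "&" t with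
  | true => simp
  | false => simp [split_no_amp t h]

-- splitOn.go prepends the reversed accumulator to its acc-free run.
theorem splitOn_go_acc (sep : List Char) (fuel : Nat) (l cur : List Char)
    (acc : List (List Char)) :
    PySem.Chars.splitOn.go sep fuel l cur acc =
      acc.reverse ++ PySem.Chars.splitOn.go sep fuel l cur [] := by
  induction fuel generalizing l cur acc with
  | zero => simp [PySem.Chars.splitOn.go]
  | succ fuel ih =>
    cases l with
    | nil => simp [PySem.Chars.splitOn.go]
    | cons c rest =>
      rw [PySem.Chars.splitOn.go, PySem.Chars.splitOn.go]
      by_cases hpre : sep.isPrefixOf (c :: rest) = true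
      · simp only [hpre, if_true]
        rw [ih (List.drop sep.length (c :: rest)) [] (cur.reverse :: acc),
            ih (List.drop sep.length (c :: rest)) [] ([cur.reverse])]
        simp
      · simp only [hpre]
        exact ih rest (c :: cur) acc

-- B's inner character loop counts exactly the tokens of splitOn ['&'] that equal color.
theorem scan_go_eq_splitOn_go (color : String) (fuel : Nat) (l tk : List Char) (c : Int)
    (hfuel : l.length ≤ fuel) :
    (let st := l.foldl
        (fun (st : List Char × Int) ch =>
          if ch == '&' then
            ([], if String.ofList st.1 == color then st.2 + 1 else st.2)
          else
            (st.1 ++ [ch], st.2)) (tk, c)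
     if String.ofList st.1 == color then st.2 + 1 else st.2)
    = c + (((PySem.Chars.splitOn.go ['&'] fuel l tk.reverse []).map String.ofList).count color : Int) := by
  induction l generalizing fuel tk c with
  | nil =>
    cases fuel with
    | zero =>
      simp only [List.foldl_nil, PySem.Chars.splitOn.go]
      simp [List.count_singleton]
      by_cases h : String.ofList tk = color <;> simp [h]
    | succ fuel =>
      simp only [List.foldl_nil, PySem.Chars.splitOn.go]
      simp [List.count_singleton]
      by_cases h : String.ofList tk = color <;> simp [h]
  | cons ch rest ih =>
    cases fuel with
    | zero => exact absurd hfuel (by simp)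
    | succ fuel =>
      have hrest : rest.length ≤ fuel := by simpa using hfuel
      rw [PySem.Chars.splitOn.go]
      by_cases hamp : ch = '&'
      · subst hamp
        have hpre : (['&'] : List Char).isPrefixOf ('&' :: rest) = true := by
          simp [List.isPrefixOf]
        simp only [hpre, if_true]
        have hdrop : List.drop (['&'] : List Char).length ('&' :: rest) = rest := by simp
        rw [hdrop, splitOn_go_acc ['&'] fuel rest [] [tk.reverse.reverse]]
        simp only [List.foldl_cons, beq_self_eq_true, if_true]
        rw [ih fuel [] (if String.ofList tk == color then c + 1 else c) hrest]
        simp only [List.reverse_nil, List.reverse_cons, List.reverse_reverse,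
          List.map_append, List.map_cons, List.map_nil, List.count_append,
          List.count_singleton, List.nil_append]
        by_cases h : String.ofList tk = color
        · simp [h]
          ring
        · simp [h]
      · have hpre : (['&'] : List Char).isPrefixOf (ch :: rest) = false := by
          simp [List.isPrefixOf]
          exact fun h => hamp h.symm
        simp only [hpre, Bool.false_eq_true, if_false]
        simp only [List.foldl_cons, show (ch == '&') = false by simpa using hamp,
          Bool.false_eq_true, if_false]
        have := ih fuel (tk ++ [ch]) c hrest
        simpa using this
-- One thread: B's scan adds exactly the count of color among t.split("&").
theorem scanThread_eq (color : String) (c : Int) (t : String) :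
    pvScanThread color c t =
      c + ((((PySem.Str.split? t "&").getD []).count color : Nat) : Int) := by
  unfold pvScanThread
  have h := scan_go_eq_splitOn_go color (t.toList.length + 1) t.toList [] c (by omega)
  simp only [List.reverse_nil] at h
  rw [h]
  have hsplit : (PySem.Str.split? t "&").getD [] =
      (PySem.Chars.splitOn.go ['&'] (t.toList.length + 1) t.toList [] []).map String.ofList := by
    have hmap := PySem.Str.split?_map t "&"
    rw [PySem.Chars.split?] at hmap
    simp only [show (("&".toList).isEmpty) = false by rfl, Bool.false_eq_true, if_false] at hmap
    cases hs : PySem.Str.split? t "&" with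
    | none => rw [hs] at hmap; simp at hmap
    | some ls =>
      rw [hs] at hmap
      simp only [Option.map_some, Option.some.injEq] at hmap
      have hmap' : ls.map String.toList =
          PySem.Chars.splitOn.go ['&'] (t.toList.length + 1) t.toList [] [] := by
        rw [hmap]
        simp [PySem.Chars.splitOn]
      rw [Option.getD_some, ← hmap', List.map_map]
      exact ((List.map_congr_left (fun a _ => (String.ofList_toList (s := a)))).trans ls.map_id).symm
  rw [hsplit]

-- Folding B's scan over the thread list counts color in the flattened split lists.
theorem foldl_scan_eq (color : String) (ts : List String) (c : Int) :
    ts.foldl (pvScanThread color) c =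
      c + (((ts.flatMap (fun t => (PySem.Str.split? t "&").getD [])).count color : Nat) : Int) := by
  induction ts generalizing c with
  | nil => simp
  | cons t ts ih =>
    simp only [List.foldl_cons, List.flatMap_cons, List.count_append]
    rw [scanThread_eq, ih]
    push_cast
    ring

-- ===== VERDICT (by name: the statement is the Claim_ definition above) =====
theorem count_color_spec : Claim_equal_count_color := by
  intro color thread_sold _
  unfold Spec_count_color count_color count_color_alt
  simp only []
  rw [show (fun (acc : List String) thread =>
        if PySem.Str.isIn "&" thread then acc ++ (PySem.Str.split? thread "&").getD []
        else acc ++ [thread]) =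
      (fun acc thread => acc ++ (PySem.Str.split? thread "&").getD []) from by
    funext acc thread
    rw [← branch_eq_split thread]
    cases PySem.Str.isIn "&" thread <;> simp]
  rw [PySem.List.foldl_append_eq_flatMap, List.nil_append,
    PySem.List.foldl_beq_add_one, zero_add, foldl_scan_eq, zero_add]
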